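-- pv_equiv track=rewrite | github.com/ryanlcason2010-pixel/Bot_ConChat | framework-assistant/handlers/discovery.py | group_frameworks_by_domain
-- ===== SOURCE A (Python) =====
-- from typing import Dict, List, Any, Optional, Tuple
--
-- def group_frameworks_by_domain(frameworks: List[Dict]) -> Dict[str, List[Dict]]:
--     """
--     Group frameworks by their primary domain.
--
--     Args:
--         frameworks: List of framework dicts
--
--     Returns:
--         Dict mapping domain to list of frameworks
--     """
--     grouped: Dict[str, List[Dict]] = {}
--
--     for fw in frameworks:
--         domains = fw.get('business_domains', 'Other')
--         # Use first domain as primary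
--         primary_domain = domains.split(',')[0].strip() if domains else 'Other'
--
--         if primary_domain not in grouped:
--             grouped[primary_domain] = []
--         grouped[primary_domain].append(fw)
--
--     return grouped
-- ===== SOURCE B (Python) =====
-- def group_frameworks_by_domain(frameworks):
--     """
--     Group frameworks by their primary domain.
--
--     Two-phase grouping: precompute every framework's primary-domain key,
--     deduplicate the keys in first-occurrence order, then build each group
--     with one filtering pass per distinct key.
--     """
--     def key(fw):
--         domains = fw.get('business_domains', 'Other')
--         return domains.split(',')[0].strip() if domains else 'Other'
--
--     keys = [key(fw) for fw in frameworks]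
--     order = list(dict.fromkeys(keys))
--     return {k: [fw for fw, kk in zip(frameworks, keys) if kk == k] for k in order}
-- ===== Notes on version B (the rewrite author's own statement) =====
-- stated objective: alternative
-- what changed: B replaces A's single-pass dict mutation (insert-empty-on-first-sight then append) with a two-phase map/dedup/filter construction: compute all keys, take distinct keys in first-occurrence order, and build each group by filtering.
import Mathlib
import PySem

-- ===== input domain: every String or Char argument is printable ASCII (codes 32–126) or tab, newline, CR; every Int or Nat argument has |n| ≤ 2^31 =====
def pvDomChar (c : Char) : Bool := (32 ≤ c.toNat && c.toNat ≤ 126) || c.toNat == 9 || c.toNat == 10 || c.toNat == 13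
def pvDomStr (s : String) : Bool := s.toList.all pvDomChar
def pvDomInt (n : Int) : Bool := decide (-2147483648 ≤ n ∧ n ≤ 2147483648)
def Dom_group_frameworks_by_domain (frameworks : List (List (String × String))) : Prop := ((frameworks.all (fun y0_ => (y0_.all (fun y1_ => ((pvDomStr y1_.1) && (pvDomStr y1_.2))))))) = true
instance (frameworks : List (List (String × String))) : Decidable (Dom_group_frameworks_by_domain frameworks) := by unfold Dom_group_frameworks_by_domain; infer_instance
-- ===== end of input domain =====

-- B: two-phase map/dedup/filter grouping instead of A's single-pass dict mutation; same result, alternative structure.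

-- ===== PORT A =====
-- shared key expression: domains = fw.get('business_domains', 'Other');
-- domains.split(',')[0].strip() if domains else 'Other'
-- (split(',') always returns a non-empty list, so [0] is its head)
def pvPrimaryDomain (fw : List (String × String)) : String :=
  let domains := PySem.Dict.getD (PySem.Dict.mk fw) "business_domains" "Other"
  if domains ≠ "" then PySem.Str.strip (((PySem.Str.split? domains ",").getD []).headD "") else "Other"

def group_frameworks_by_domain (frameworks : List (List (String × String))) : List (String × List (List (String × String))) :=
  (frameworks.foldl
    (fun grouped fw =>
      let primary := pvPrimaryDomain fw
      let grouped := if grouped.contains primary then grouped else grouped.insert primary []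
      grouped.modify primary [] (fun l => l ++ [fw]))
    PySem.Dict.empty).items

-- ===== PORT B =====
def group_frameworks_by_domain_alt (frameworks : List (List (String × String))) : List (String × List (List (String × String))) :=
  let keys := frameworks.map pvPrimaryDomain
  (PySem.List.dedup keys).map (fun k =>
    (k, ((frameworks.zip keys).filter (fun p => p.2 == k)).map (fun p => p.1)))

-- ===== PRECONDITION & SPEC =====
def Spec_group_frameworks_by_domain (frameworks : List (List (String × String))) (out : List (String × List (List (String × String)))) : Prop := out = group_frameworks_by_domain_alt frameworks
instance (frameworks : List (List (String × String))) (out : List (String × List (List (String × String)))) : Decidable (Spec_group_frameworks_by_domain frameworks out) := by unfold Spec_group_frameworks_by_domain; infer_instance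

-- ===== CLAIM (what is proved, stated in full; the proofs are below) =====
def Claim_equal_group_frameworks_by_domain : Prop := ∀ (frameworks : List (List (String × String))), Dom_group_frameworks_by_domain frameworks → Spec_group_frameworks_by_domain frameworks (group_frameworks_by_domain frameworks)

-- ===== LEMMAS AND PROOFS =====

-- A's loop body (setdefault-to-[] then append) is one dict modify
lemma step_eq_modify (g : PySem.Dict String (List (List (String × String)))) (fw : List (String × String)) :
    (let primary := pvPrimaryDomain fw
     let g' := if g.contains primary then g else g.insert primary []
     g'.modify primary [] (fun l => l ++ [fw]))
    = g.modify (pvPrimaryDomain fw) [] (fun l => l ++ [fw]) := by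
  simp only []
  by_cases h : g.contains (pvPrimaryDomain fw)
  · simp [h]
  · have hc : g.contains (pvPrimaryDomain fw) = false := by simpa using h
    simp only [hc, Bool.false_eq_true, if_false, PySem.Dict.modify,
      PySem.Dict.getD_insert_self, PySem.Dict.insert_insert_self]
    rw [PySem.Dict.getD_of_not_contains (h := hc)]

lemma zip_map_self {α β : Type} (f : α → β) (l : List α) :
    l.zip (l.map f) = l.map (fun a => (a, f a)) := by
  induction l with
  | nil => rfl
  | cons a t ih => simp [ih]

theorem group_frameworks_by_domain_spec : Claim_equal_group_frameworks_by_domain := by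
  intro frameworks _
  unfold Spec_group_frameworks_by_domain group_frameworks_by_domain group_frameworks_by_domain_alt
  have hstep : (fun (grouped : PySem.Dict String (List (List (String × String)))) fw =>
      let primary := pvPrimaryDomain fw
      let grouped := if grouped.contains primary then grouped else grouped.insert primary []
      grouped.modify primary [] (fun l => l ++ [fw]))
      = fun grouped fw => grouped.modify (pvPrimaryDomain fw) [] (fun l => l ++ [fw]) :=
    funext fun g => funext fun fw => step_eq_modify g fw
  rw [hstep]
  have hfold : frameworks.foldl
        (fun grouped fw => grouped.modify (pvPrimaryDomain fw) [] (fun l => l ++ [fw])) PySem.Dict.empty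
      = (frameworks.map (fun fw => (pvPrimaryDomain fw, fw))).foldl
          (fun d p => d.modify p.1 [] (fun l => l ++ [p.2])) PySem.Dict.empty := by
    rw [List.foldl_map]
  rw [hfold]
  set l := frameworks.map (fun fw => (pvPrimaryDomain fw, fw)) with hl
  set d := l.foldl (fun d p => d.modify p.1 [] (fun l => l ++ [p.2])) PySem.Dict.empty with hd
  have hnd : d.keys.Nodup := by
    rw [hd]
    exact PySem.Dict.nodup_keys_foldl_modify_key l Prod.fst [] (fun d p => fun l => l ++ [p.2])
      PySem.Dict.empty (by simp)
  have hkeys : d.keys = PySem.List.dedup (frameworks.map pvPrimaryDomain) := by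
    rw [hd, PySem.Dict.keys_foldl_modify_key]
    simp [hl, PySem.Set.update_nil_left, List.map_map, Function.comp_def]
  rw [PySem.Dict.items_eq_map_keys d hnd [], hkeys]
  apply List.map_congr_left
  intro k _
  have hget : d.getD k [] = (l.filter (fun p => p.1 == k)).map (fun p => p.2) := by
    rw [hd, PySem.Dict.getD_foldl_modify_append]
    simp
  rw [hget, hl, zip_map_self, List.filter_map, List.filter_map, List.map_map, List.map_map]
  rfl
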